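-- pv_equiv track=rewrite | github.com/tonygwu/2048-bot | sim_utils.py | _count_created_in_line
-- ===== SOURCE A (Python) =====
-- def _count_created_in_line(line: list[int], target_tile: int) -> int:
--     """Count how many times target_tile is created by left-slide merges on one line."""
--     tiles = [x for x in line if x != 0]
--     created = 0
--     i = 0
--     while i < len(tiles):
--         if i + 1 < len(tiles) and tiles[i] == tiles[i + 1]:
--             merged = tiles[i] * 2
--             if merged == target_tile:
--                 created += 1
--             i += 2
--         else:
--             i += 1
--     return created
-- ===== SOURCE B (Python) =====
-- def _count_created_in_line(line: list[int], target_tile: int) -> int: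
--     """One pass with run-length tracking: each maximal run of k equal nonzero
--     tiles v contributes k//2 merges of value 2*v (merges do not cascade)."""
--     created = 0
--     run_val = 0
--     run_len = 0
--     for x in line:
--         if x == 0:
--             continue
--         if x == run_val:
--             run_len += 1
--         else:
--             if run_val * 2 == target_tile:
--                 created += run_len // 2
--             run_val = x
--             run_len = 1
--     if run_val * 2 == target_tile:
--         created += run_len // 2
--     return created
-- ===== Notes on version B (the rewrite author's own statement) =====
-- stated objective: faster
-- what changed: Replaces the build-filtered-list-then-pairwise-index-walk merge simulation with a single pass over the line that tracks maximal runs of equal nonzero tiles and adds run_length//2 per matching run (no intermediate list, constant-factor speedup measured).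
import Mathlib
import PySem

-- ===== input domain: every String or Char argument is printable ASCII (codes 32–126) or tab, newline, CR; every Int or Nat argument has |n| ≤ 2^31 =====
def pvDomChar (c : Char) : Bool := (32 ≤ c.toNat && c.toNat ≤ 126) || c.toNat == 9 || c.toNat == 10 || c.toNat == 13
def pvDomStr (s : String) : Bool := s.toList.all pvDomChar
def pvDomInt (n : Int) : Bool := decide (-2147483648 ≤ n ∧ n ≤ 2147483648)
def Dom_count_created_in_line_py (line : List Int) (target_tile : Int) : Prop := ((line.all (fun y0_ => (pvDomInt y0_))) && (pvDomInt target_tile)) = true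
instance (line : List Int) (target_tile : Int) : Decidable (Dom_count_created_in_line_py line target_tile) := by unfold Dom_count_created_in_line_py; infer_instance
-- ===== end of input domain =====

-- B replaces A's filtered-list pairwise index walk with a single run-length pass (run_len//2 per matching run); measured constant-factor speedup.


-- ===== PORT A =====
-- A's while loop over `tiles` with index i, advancing by 2 on a merge and 1
-- otherwise, as the obvious structural recursion on the unprocessed suffix.
def aWalk (tiles : List Int) (target_tile : Int) (created : Int) : Int :=
  match tiles with
  | a :: b :: rest =>
      if a == b then
        aWalk rest target_tile (created + (if a * 2 == target_tile then 1 else 0))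
      else
        aWalk (b :: rest) target_tile created
  | _ => created

def count_created_in_line_py (line : List Int) (target_tile : Int) : Int :=
  aWalk (line.filter (fun x => !(x == 0))) target_tile 0

-- ===== PORT B =====
-- B's single for-loop: state (created, run_val, run_len), final flush at the end.
def bRun (line : List Int) (target_tile : Int) (created run_val run_len : Int) : Int :=
  match line with
  | [] => if run_val * 2 == target_tile then created + PySem.Int.floordiv run_len 2 else created
  | x :: rest =>
      if x == 0 then bRun rest target_tile created run_val run_len
      else if x == run_val then bRun rest target_tile created run_val (run_len + 1)
      else
        bRun rest target_tile
          (if run_val * 2 == target_tile then created + PySem.Int.floordiv run_len 2 else created)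
          x 1

def count_created_in_line_py_alt (line : List Int) (target_tile : Int) : Int :=
  bRun line target_tile 0 0 0

-- ===== PRECONDITION & SPEC =====
def Spec_count_created_in_line_py (line : List Int) (target_tile : Int) (out : Int) : Prop := out = count_created_in_line_py_alt line target_tile
instance (line : List Int) (target_tile : Int) (out : Int) : Decidable (Spec_count_created_in_line_py line target_tile out) := by unfold Spec_count_created_in_line_py; infer_instance

-- ===== CLAIM (what is proved, stated in full; the proofs are below) =====
def Claim_equal_count_created_in_line_py : Prop := ∀ (line : List Int) (target_tile : Int), Dom_count_created_in_line_py line target_tile → Spec_count_created_in_line_py line target_tile (count_created_in_line_py line target_tile)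

-- ===== LEMMAS AND PROOFS =====

-- Accumulator-free version of A's walk (proof helper).
def pureWalk (tiles : List Int) (t : Int) : Int :=
  match tiles with
  | a :: b :: rest =>
      if a == b then (if a * 2 == t then 1 else 0) + pureWalk rest t
      else pureWalk (b :: rest) t
  | _ => 0

theorem aWalk_eq_pure (tiles : List Int) (t c : Int) :
    aWalk tiles t c = c + pureWalk tiles t := by
  induction tiles using pureWalk.induct generalizing c with
  | case1 a b rest hab ih =>
    simp only [aWalk, pureWalk, hab, if_pos, ih]
    ring
  | case2 a b rest hab ih =>
    simp [aWalk, pureWalk, hab, ih]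
  | case3 tiles h =>
    match tiles, h with
    | [], _ => simp [aWalk, pureWalk]
    | [a], _ => simp [aWalk, pureWalk]
    | a :: b :: r, h => exact absurd rfl (h a b r)

-- B's loop ignores zeros: it equals itself on the zero-filtered line.
theorem bRun_filter (line : List Int) (t c v l : Int) :
    bRun line t c v l = bRun (line.filter (fun x => !(x == 0))) t c v l := by
  induction line generalizing c v l with
  | nil => rfl
  | cons x rest ih =>
    by_cases hx : x = 0
    · simpa [bRun, hx] using ih c v l
    · have hf : (x :: rest).filter (fun x => !(x == 0))
          = x :: rest.filter (fun x => !(x == 0)) := by simp [hx]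
      rw [hf]
      simp only [bRun]
      split_ifs <;> apply ih

-- The walk on a pure run of n equal tiles: closed form n / 2.
theorem pureWalk_replicate (n : Nat) (v t : Int) :
    pureWalk (List.replicate n v) t = if v * 2 == t then ((n / 2 : Nat) : Int) else 0 := by
  induction n using Nat.twoStepInduction with
  | zero => simp [pureWalk]
  | one => simp [List.replicate, pureWalk]
  | more n ih _ =>
    have : List.replicate (n + 2) v = v :: v :: List.replicate n v := by
      simp [List.replicate]
    rw [this]
    simp only [pureWalk, BEq.rfl, if_pos, ih]
    have h2 : ((n + 2) / 2 : Nat) = (n / 2 : Nat) + 1 := by omega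
    split_ifs <;> simp [h2] <;> ring

-- A run followed by a different tile: the run contributes n/2 and the walk restarts.
theorem pureWalk_replicate_append (n : Nat) (v t x : Int) (rest : List Int) (hx : x ≠ v) :
    pureWalk (List.replicate n v ++ x :: rest) t
      = (if v * 2 == t then ((n / 2 : Nat) : Int) else 0) + pureWalk (x :: rest) t := by
  induction n using Nat.twoStepInduction with
  | zero => simp [pureWalk]
  | one =>
    have hvx : ¬ (v == x) = true := by simpa using fun h => hx h.symm
    simp [pureWalk, List.replicate, hvx]
  | more n ih _ =>
    have : List.replicate (n + 2) v ++ x :: rest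
        = v :: v :: (List.replicate n v ++ x :: rest) := by simp [List.replicate]
    rw [this]
    simp only [pureWalk, BEq.rfl, if_pos, ih]
    have h2 : ((n + 2) / 2 : Nat) = (n / 2 : Nat) + 1 := by omega
    split_ifs <;> simp [h2] <;> ring

-- Main invariant: B's state (created, run_val, run_len) versus A's walk on the
-- pending run prepended to the remaining (nonzero) tiles.
theorem bRun_eq (tiles : List Int) (t : Int) (h0 : ∀ x ∈ tiles, x ≠ 0)
    (c v : Int) (n : Nat) (hv : n = 0 ∨ v ≠ 0) :
    bRun tiles t c v (n : Int) = c + pureWalk (List.replicate n v ++ tiles) t := by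
  induction tiles generalizing c v n with
  | nil =>
    simp only [bRun, List.append_nil, pureWalk_replicate]
    have hfd : PySem.Int.floordiv (n : Int) 2 = ((n / 2 : Nat) : Int) :=
      PySem.Int.floordiv_natCast n 2
    split_ifs with h <;> simp [hfd]
  | cons x rest ih =>
    have hx0 : x ≠ 0 := h0 x (by simp)
    have h0' : ∀ y ∈ rest, y ≠ 0 := fun y hy => h0 y (by simp [hy])
    by_cases hxv : x = v
    · subst hxv
      have hv' : x ≠ 0 := hx0
      have : bRun (x :: rest) t c x (n : Int) = bRun rest t c x ((n + 1 : Nat) : Int) := by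
        simp [bRun, hx0]
      rw [this, ih h0' c x (n + 1) (Or.inr hv')]
      congr 1
      have : List.replicate n x ++ x :: rest = List.replicate (n + 1) x ++ rest := by
        rw [List.replicate_succ', List.append_assoc]; rfl
      rw [this]
    · have hstep : bRun (x :: rest) t c v (n : Int)
          = bRun rest t (if v * 2 == t then c + PySem.Int.floordiv (n : Int) 2 else c) x 1 := by
        simp [bRun, hx0, hxv]
      rw [hstep]
      have h1 : ((1 : Nat) : Int) = (1 : Int) := by norm_num
      rw [← h1, ih h0' _ x 1 (Or.inr hx0)]
      have hfd : PySem.Int.floordiv (n : Int) 2 = ((n / 2 : Nat) : Int) :=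
        PySem.Int.floordiv_natCast n 2
      rw [pureWalk_replicate_append n v t x rest hxv]
      have : List.replicate 1 x ++ rest = x :: rest := by simp [List.replicate]
      rw [this]
      split_ifs with h <;> simp [hfd] <;> ring

-- ===== VERDICT (by name: the statement is the Claim_ definition above) =====
theorem count_created_in_line_py_spec : Claim_equal_count_created_in_line_py := by
  intro line t _
  unfold Spec_count_created_in_line_py count_created_in_line_py count_created_in_line_py_alt
  rw [bRun_filter]
  have h0 : ∀ x ∈ line.filter (fun x => !(x == 0)), x ≠ 0 := by
    intro x hx
    simpa using (List.of_mem_filter hx)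
  have hb := bRun_eq (line.filter (fun x => !(x == 0))) t h0 0 0 0 (Or.inl rfl)
  rw [aWalk_eq_pure]
  simpa using hb.symm
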